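-- pv_equiv track=rewrite | github.com/QuHarmonics/Nexus-4-Framework-Recursive-Harmonic-Architecture | Python Code - Raw Dump/Recursive Symbolic Genome Mapper — Architecture and Phase I Design-code_7.py | delta_collapse
-- ===== SOURCE A (Python) =====
-- from typing import List
--
-- def delta_collapse(data: List[int]) -> List[List[int]]:
--     """Apply recursive delta collapse until the list cannot shrink further."""
--     history = [data[:]]  # Store all intermediate collapse stages
--     current = data[:]
--
--     while len(current) > 1:
--         next_stage = [abs(current[i + 1] - current[i]) for i in range(len(current) - 1)]
--         history.append(next_stage)
--         if next_stage == current: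
--             break  # Reached steady state
--         current = next_stage
--
--     return history
-- ===== SOURCE B (Python) =====
-- from typing import List
--
-- def delta_collapse(data: List[int]) -> List[List[int]]:
--     """Direct recursion: each call owns one collapse stage and prepends it."""
--     if len(data) <= 1:
--         return [data[:]]
--     nxt = [abs(y - x) for x, y in zip(data, data[1:])]
--     return [data[:]] + delta_collapse(nxt)
-- ===== Notes on version B (the rewrite author's own statement) =====
-- stated objective: alternative
-- what changed: Replaced the iterative while-loop with an explicit history accumulator (and its dead steady-state break) by direct recursion that prepends the current stage and recurses on the pairwise |differences| built with zip.
import Mathlib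
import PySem

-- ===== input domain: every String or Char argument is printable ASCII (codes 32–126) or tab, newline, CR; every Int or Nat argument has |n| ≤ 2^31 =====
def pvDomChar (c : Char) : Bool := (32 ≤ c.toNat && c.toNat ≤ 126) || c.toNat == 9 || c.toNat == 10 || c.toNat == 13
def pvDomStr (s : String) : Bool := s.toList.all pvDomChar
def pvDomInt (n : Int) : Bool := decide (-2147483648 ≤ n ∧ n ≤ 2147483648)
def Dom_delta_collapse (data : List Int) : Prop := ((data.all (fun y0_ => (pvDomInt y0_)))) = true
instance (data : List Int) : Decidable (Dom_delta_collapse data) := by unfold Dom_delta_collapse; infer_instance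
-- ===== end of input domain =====

-- B replaces A's while-loop with a history accumulator (and its dead steady-state check)
-- by direct recursion prepending each stage; same values, same cost (objective: alternative).

-- ===== PORT A =====
-- next_stage = [abs(current[i+1] - current[i]) for i in range(len(current)-1)]
-- (indices i and i+1 are always in range, so getD 0 is exact)
def deltaStageA (cur : List Int) : List Int :=
  (List.range (cur.length - 1)).map fun i => |(cur[i+1]?.getD 0) - (cur[i]?.getD 0)|

-- the while-loop, fueled by the initial length (each iteration shortens current by 1)
def deltaLoopA : Nat → List Int → List (List Int) → List (List Int)
  | 0, _, history => history
  | fuel+1, current, history =>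
    if current.length > 1 then
      let next_stage := deltaStageA current
      let history := history ++ [next_stage]
      if next_stage = current then history
      else deltaLoopA fuel next_stage history
    else history

def delta_collapse (data : List Int) : List (List Int) :=
  deltaLoopA data.length data [data]

-- ===== PORT B =====
-- nxt = [abs(y - x) for x, y in zip(data, data[1:])]
def deltaStageB (data : List Int) : List Int :=
  List.zipWith (fun x y => |y - x|) data (data.drop 1)

def delta_collapse_alt (data : List Int) : List (List Int) :=
  if h : data.length ≤ 1 then [data]
  else data :: delta_collapse_alt (deltaStageB data)
termination_by data.length
decreasing_by simp [deltaStageB]; omega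

-- ===== PRECONDITION & SPEC =====
def Spec_delta_collapse (data : List Int) (out : List (List Int)) : Prop := out = delta_collapse_alt data
instance (data : List Int) (out : List (List Int)) : Decidable (Spec_delta_collapse data out) := by unfold Spec_delta_collapse; infer_instance

-- ===== CLAIM (what is proved, stated in full; the proofs are below) =====
def Claim_equal_delta_collapse : Prop := ∀ (data : List Int), Dom_delta_collapse data → Spec_delta_collapse data (delta_collapse data)

-- ===== LEMMAS AND PROOFS =====

lemma stageA_eq_stageB (cur : List Int) : deltaStageA cur = deltaStageB cur := by
  apply List.ext_getElem
  · simp [deltaStageA, deltaStageB]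
  · intro i h1 h2
    simp only [deltaStageA, List.length_map, List.length_range] at h1
    simp only [deltaStageA, List.getElem_map, List.getElem_range, deltaStageB,
      List.getElem_zipWith, List.getElem_drop]
    rw [List.getElem?_eq_getElem (by omega), List.getElem?_eq_getElem (by omega)]
    simp [Nat.add_comm]

lemma stageB_length (cur : List Int) : (deltaStageB cur).length = cur.length - 1 := by
  simp [deltaStageB]

lemma loopA_eq_alt (fuel : Nat) (cur : List Int) (hist : List (List Int))
    (h : cur.length ≤ fuel) :
    deltaLoopA fuel cur (hist ++ [cur]) = hist ++ delta_collapse_alt cur := by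
  induction fuel generalizing cur hist with
  | zero =>
    have : cur = [] := List.eq_nil_of_length_eq_zero (by omega)
    subst this
    simp [deltaLoopA, delta_collapse_alt]
  | succ f ih =>
    by_cases hl : cur.length > 1
    · have hne : deltaStageA cur ≠ cur := by
        intro he
        have := congrArg List.length he
        rw [stageA_eq_stageB, stageB_length] at this
        omega
      rw [delta_collapse_alt]
      rw [dif_neg (by omega)]
      simp only [deltaLoopA, if_pos hl, if_neg hne]
      have hlen : (deltaStageA cur).length ≤ f := by
        rw [stageA_eq_stageB, stageB_length]; omega
      have := ih (deltaStageA cur) (hist ++ [cur]) hlen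
      rw [this, stageA_eq_stageB]
      simp
    · rw [delta_collapse_alt, dif_pos (by omega)]
      simp [deltaLoopA, hl]

-- ===== VERDICT (by name: the statement is the Claim_ definition above) =====
theorem delta_collapse_spec : Claim_equal_delta_collapse := by
  intro data _
  unfold Spec_delta_collapse delta_collapse
  have := loopA_eq_alt data.length data [] (le_refl _)
  simpa using this
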